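-- pv_equiv track=rewrite | github.com/AsmaBaccouche/A-Qualitative-Study-Using-Text-Clustering-Analysis | Data_helper.py | split_number_word
-- ===== SOURCE A (Python) =====
-- Numbers = ["0","1","2","3","4","5","6","7","8","9"]
--
-- def split_number_word(sentence):
--     words = sentence.split()
--     new_words=[]
--     for word in words:
--         if len(word) > 2:
--             new=''
--             i=0
--             while(i<len(word)-1):
--                 if (word[i] in Numbers and word[i+1] in Numbers) or (word[i] not in Numbers and word[i+1] not in Numbers):
--                     new=new+word[i]
--                 else :
--                     if (word[i] in Numbers and word[i+1] not in Numbers) or (word[i+1] in Numbers and word[i] not in Numbers):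
--                         new=new+word[i]+' '
--                 i=i+1
--             word=new+word[len(word)-1]
--         new_words.append(word)
--     return(' '.join(new_words))
-- ===== SOURCE B (Python) =====
-- DIGITS = "0123456789"
--
-- def split_number_word(sentence):
--     out = []
--     for word in sentence.split():
--         if len(word) > 2:
--             # stage 1: the boundary positions where digit-ness flips
--             cuts = [i for i in range(1, len(word))
--                     if (word[i] in DIGITS) != (word[i - 1] in DIGITS)]
--             # stage 2: cut the word into slices at those positions and join them
--             pieces = []
--             prev = 0
--             for k in cuts + [len(word)]:
--                 pieces.append(word[prev:k])
--                 prev = k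
--             word = ' '.join(pieces)
--         out.append(word)
--     return ' '.join(out)
-- ===== Notes on version B (the rewrite author's own statement) =====
-- stated objective: faster
-- what changed: A builds each word's result character by character in one lookahead scan with repeated quadratic string concatenation; B instead first computes the list of digit/non-digit boundary positions with a range comprehension and then cuts the word into slices at those positions, joining slices and words with single join calls.
import Mathlib
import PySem

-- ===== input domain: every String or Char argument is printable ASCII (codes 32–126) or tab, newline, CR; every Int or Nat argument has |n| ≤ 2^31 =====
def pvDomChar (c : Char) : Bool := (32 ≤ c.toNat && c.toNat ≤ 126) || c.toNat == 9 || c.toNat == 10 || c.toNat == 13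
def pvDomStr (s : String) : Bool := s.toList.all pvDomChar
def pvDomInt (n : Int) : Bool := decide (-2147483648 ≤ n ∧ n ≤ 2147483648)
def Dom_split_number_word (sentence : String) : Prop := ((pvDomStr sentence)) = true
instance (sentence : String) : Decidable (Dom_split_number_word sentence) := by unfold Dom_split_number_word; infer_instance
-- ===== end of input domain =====

-- B replaces A's lookahead scan with repeated string concatenation by a staged computation:
-- first the list of digit/non-digit boundary positions, then the word cut into slices at those
-- positions and joined with spaces (objective: faster; measured faster on the timing inputs).

-- ===== PORT A =====
def pvNumbers : List Char := ['0','1','2','3','4','5','6','7','8','9']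

-- the while-loop over i < len(word)-1, looking at word[i], word[i+1]
def pvAScan : List Char → List Char
  | c1 :: c2 :: rest =>
    if (pvNumbers.contains c1 && pvNumbers.contains c2)
        || (!pvNumbers.contains c1 && !pvNumbers.contains c2) then
      c1 :: pvAScan (c2 :: rest)
    else if (pvNumbers.contains c1 && !pvNumbers.contains c2)
        || (pvNumbers.contains c2 && !pvNumbers.contains c1) then
      c1 :: ' ' :: pvAScan (c2 :: rest)
    else
      pvAScan (c2 :: rest)
  | _ => []

def pvAWord (w : List Char) : List Char :=
  if w.length > 2 then pvAScan w ++ [w.getLast?.getD ' '] else w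

def split_number_word (sentence : String) : String :=
  String.ofList (PySem.Chars.join [' ']
    ((PySem.Chars.split₀ sentence.toList).foldl (fun acc w => acc ++ [pvAWord w]) []))

-- ===== PORT B =====
def pvDigits : List Char := ['0','1','2','3','4','5','6','7','8','9']  -- the chars of "0123456789"

-- stage 1: [i for i in range(1, len(word)) if (word[i] in DIGITS) != (word[i-1] in DIGITS)]
def pvCuts (w : List Char) : List Int :=
  (PySem.List.pyRange 1 ((w.length : Int)) 1).filter
    (fun i => (pvDigits.contains (PySem.List.pyGetD w i ' '))
              != (pvDigits.contains (PySem.List.pyGetD w (i - 1) ' ')))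

-- stage 2: the pieces loop over cuts + [len(word)] with state (pieces, prev)
def pvPieces (w : List Char) : List (List Char) :=
  ((pvCuts w ++ [(w.length : Int)]).foldl
    (fun (st : List (List Char) × Int) k =>
      (st.1 ++ [PySem.Chars.slice w (some st.2) (some k)], k))
    ([], 0)).1

def pvBWord (w : List Char) : List Char :=
  if w.length > 2 then PySem.Chars.join [' '] (pvPieces w) else w

def split_number_word_alt (sentence : String) : String :=
  String.ofList (PySem.Chars.join [' ']
    ((PySem.Chars.split₀ sentence.toList).map pvBWord))

-- ===== PRECONDITION & SPEC =====
def Spec_split_number_word (sentence : String) (out : String) : Prop := out = split_number_word_alt sentence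
instance (sentence : String) (out : String) : Decidable (Spec_split_number_word sentence out) := by unfold Spec_split_number_word; infer_instance

-- ===== CLAIM (what is proved, stated in full; the proofs are below) =====
def Claim_equal_split_number_word : Prop := ∀ (sentence : String), Dom_split_number_word sentence → Spec_split_number_word sentence (split_number_word sentence)

-- ===== LEMMAS AND PROOFS =====

def pvIsDig (c : Char) : Bool := pvDigits.contains c

-- reference form of A's word transform: simple previous-char recursion
def pvTailScan (p : Char) : List Char → List Char
  | [] => []
  | c :: rest =>
    (if pvIsDig p == pvIsDig c then [c] else [' ', c]) ++ pvTailScan c rest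

theorem pvMem_iff (c : Char) : c ∈ pvNumbers ↔ pvIsDig c = true := by
  rw [show pvIsDig c = pvNumbers.contains c from rfl, List.contains_iff_mem]

theorem pvAScan_same (c1 c2 : Char) (rest : List Char) (h : pvIsDig c1 = pvIsDig c2) :
    pvAScan (c1 :: c2 :: rest) = c1 :: pvAScan (c2 :: rest) := by
  cases hd : pvIsDig c1 <;> rw [hd] at h <;>
    simp [pvAScan, pvMem_iff, hd, h.symm]

theorem pvAScan_diff (c1 c2 : Char) (rest : List Char) (h : ¬ pvIsDig c1 = pvIsDig c2) :
    pvAScan (c1 :: c2 :: rest) = c1 :: ' ' :: pvAScan (c2 :: rest) := by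
  cases hd : pvIsDig c1 <;> cases hd2 : pvIsDig c2 <;>
    simp_all [pvAScan, pvMem_iff]

theorem pvAScan_last (rest : List Char) (c : Char) :
    pvAScan (c :: rest) ++ [(c :: rest).getLast?.getD ' '] = c :: pvTailScan c rest := by
  induction rest generalizing c with
  | nil => simp [pvAScan, pvTailScan]
  | cons c2 rest ih =>
    by_cases h : pvIsDig c = pvIsDig c2
    · rw [pvAScan_same c c2 rest h]
      simp [pvTailScan, h, ← ih c2]
    · rw [pvAScan_diff c c2 rest h]
      simp [pvTailScan, h, ← ih c2]

-- B-side reference form of the cut positions: recursion over the suffix, j = absolute index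
def pvSufCuts : List Char → Int → List Int
  | c :: c2 :: rest, j =>
    (if pvIsDig c == pvIsDig c2 then [] else [j]) ++ pvSufCuts (c2 :: rest) (j + 1)
  | _, _ => []

theorem pvSufCuts_ge (u : List Char) (j : Int) : ∀ x ∈ pvSufCuts u j, j ≤ x := by
  induction u generalizing j with
  | nil => simp [pvSufCuts]
  | cons c rest ih =>
    cases rest with
    | nil => simp [pvSufCuts]
    | cons c2 rest' =>
      intro x hx
      simp only [pvSufCuts] at hx
      rcases List.mem_append.1 hx with h | h
      · split at h <;> simp_all
      · have := ih (j + 1) x h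
        omega

-- B's filter over range(1, len) computes pvSufCuts
theorem pvCuts_from (w u : List Char) : ∀ (j : Nat), 1 ≤ j → w.drop (j - 1) = u →
    (PySem.List.pyRange (j : Int) ((w.length : Int)) 1).filter
      (fun i => (pvDigits.contains (PySem.List.pyGetD w i ' '))
                != (pvDigits.contains (PySem.List.pyGetD w (i - 1) ' ')))
      = pvSufCuts u (j : Int) := by
  induction u with
  | nil =>
    intro j hj hdrop
    have hlen : w.length ≤ j - 1 := List.drop_eq_nil_iff.1 hdrop
    rw [PySem.List.pyRange_one_eq_nil (by omega)]
    rfl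
  | cons c u' ih =>
    cases u' with
    | nil =>
      intro j hj hdrop
      have hlen : w.length - (j - 1) = 1 := by
        have := congrArg List.length hdrop; simp at this; omega
      rw [PySem.List.pyRange_one_eq_nil (by omega)]
      rfl
    | cons c2 rest' =>
      intro j hj hdrop
      have hlen : w.length - (j - 1) = 2 + rest'.length := by
        have := congrArg List.length hdrop; simp at this; omega
      have hjlen : j + 1 ≤ w.length := by omega
      have hc : w[j - 1]? = some c := by
        have := congrArg (fun l => l[0]?) hdrop
        simpa [List.getElem?_drop] using this
      have hc2 : w[j]? = some c2 := by
        have := congrArg (fun l => l[1]?) hdrop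
        simpa [List.getElem?_drop, Nat.sub_add_cancel hj] using this
      have hdrop2 : w.drop j = c2 :: rest' := by
        have : (w.drop (j - 1)).drop 1 = w.drop j := by
          rw [List.drop_drop]; congr 1; omega
        rw [← this, hdrop]; rfl
      rw [PySem.List.pyRange_one_cons (by omega)]
      rw [List.filter_cons]
      have hgj : PySem.List.pyGetD w ((j : Int)) ' ' = c2 := by
        rw [PySem.List.pyGetD_natCast]
        simp [List.getD, hc2]
      have hgj1 : PySem.List.pyGetD w ((j : Int) - 1) ' ' = c := by
        have : ((j : Int) - 1) = ((j - 1 : Nat) : Int) := by omega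
        rw [this, PySem.List.pyGetD_natCast]
        simp [List.getD, hc]
      have hih := ih (j + 1) (by omega) (by simpa using hdrop2)
      have hcast : ((j : Int) + 1) = ((j + 1 : Nat) : Int) := by omega
      cases hb : (pvIsDig c == pvIsDig c2) with
      | true =>
        have hpred : (pvDigits.contains (PySem.List.pyGetD w ((j : Int)) ' ')
            != pvDigits.contains (PySem.List.pyGetD w ((j : Int) - 1) ' ')) = false := by
          rw [hgj, hgj1]
          have hcc : pvIsDig c = pvIsDig c2 := by simpa using hb
          rw [show (pvDigits.contains c2 : Bool) = pvIsDig c2 from rfl,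
              show (pvDigits.contains c : Bool) = pvIsDig c from rfl, hcc]
          simp
        rw [hpred, if_neg Bool.false_ne_true]
        rw [show pvSufCuts (c :: c2 :: rest') (j : Int)
            = pvSufCuts (c2 :: rest') ((j : Int) + 1) by simp [pvSufCuts, hb]]
        rw [hcast, ← hih]
      | false =>
        have hpred : (pvDigits.contains (PySem.List.pyGetD w ((j : Int)) ' ')
            != pvDigits.contains (PySem.List.pyGetD w ((j : Int) - 1) ' ')) = true := by
          rw [hgj, hgj1]
          simp only [bne_iff_ne, ne_eq]
          intro hh
          rw [show (pvDigits.contains c2 : Bool) = pvIsDig c2 from rfl,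
              show (pvDigits.contains c : Bool) = pvIsDig c from rfl] at hh
          rw [hh] at hb
          simp at hb
        rw [hpred, if_pos rfl]
        rw [show pvSufCuts (c :: c2 :: rest') (j : Int)
            = (j : Int) :: pvSufCuts (c2 :: rest') ((j : Int) + 1) by simp [pvSufCuts, hb]]
        rw [hcast, ← hih]

-- the pieces fold, as a simple recursion over the cut list
def pvSliceSeq (w : List Char) (a : Int) : List Int → List (List Char)
  | [] => []
  | k :: ks => PySem.Chars.slice w (some a) (some k) :: pvSliceSeq w k ks

theorem pvFoldPieces (w : List Char) (ks : List Int) :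
    ∀ (acc : List (List Char)) (a : Int),
      (ks.foldl (fun (st : List (List Char) × Int) k =>
        (st.1 ++ [PySem.Chars.slice w (some st.2) (some k)], k)) (acc, a)).1
      = acc ++ pvSliceSeq w a ks := by
  induction ks with
  | nil => simp [pvSliceSeq]
  | cons k ks ih =>
    intro acc a
    simp only [List.foldl_cons, pvSliceSeq]
    rw [ih]
    simp

theorem pvJoin_head_cons (c : Char) (y : List Char) (xs : List (List Char)) :
    PySem.Chars.join [' '] ((c :: y) :: xs) = c :: PySem.Chars.join [' '] (y :: xs) := by
  cases xs with
  | nil => simp [PySem.Chars.join_singleton]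
  | cons x xs => simp [PySem.Chars.join_cons_cons]

theorem pvJoin_singleton_cons (c : Char) (xs : List (List Char)) (hxs : xs ≠ []) :
    PySem.Chars.join [' '] ([c] :: xs) = c :: ' ' :: PySem.Chars.join [' '] xs := by
  cases xs with
  | nil => exact absurd rfl hxs
  | cons x xs => simp [PySem.Chars.join_cons_cons]

theorem pvSliceSeq_ne_nil (w : List Char) (a : Int) (ks : List Int) (h : ks ≠ []) :
    pvSliceSeq w a ks ≠ [] := by
  cases ks with
  | nil => exact absurd rfl h
  | cons k ks => simp [pvSliceSeq]

-- dropping the first character of the current piece shifts the whole joined slice list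
theorem pvShiftSlice (w : List Char) (c : Char) (rest : List Char) (j : Nat) (hj : 1 ≤ j)
    (hdrop : w.drop (j - 1) = c :: rest) (k : Int) (hk : (j : Int) ≤ k) :
    PySem.Chars.slice w (some ((j - 1 : Nat) : Int)) (some k)
      = c :: PySem.Chars.slice w (some ((j : Nat) : Int)) (some k) := by
  rw [PySem.Chars.slice_eq_listSlice, PySem.Chars.slice_eq_listSlice,
      PySem.List.slice_toNat w (by omega) (by omega),
      PySem.List.slice_toNat w (by omega) (by omega)]
  have h1 : ((j - 1 : Nat) : Int).toNat = j - 1 := by omega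
  have h2 : ((j : Nat) : Int).toNat = j := by omega
  have h3 : w.drop j = rest := by
    have : (w.drop (j - 1)).drop 1 = w.drop j := by
      rw [List.drop_drop]; congr 1; omega
    rw [← this, hdrop]; rfl
  rw [h1, h2, hdrop, h3]
  rw [show k.toNat - (j - 1) = (k.toNat - j) + 1 by omega]
  simp [List.take_succ_cons]

theorem pvJoinShift (w : List Char) (c : Char) (rest : List Char) (j : Nat) (hj : 1 ≤ j)
    (hdrop : w.drop (j - 1) = c :: rest) (ks : List Int) (hne : ks ≠ [])
    (hge : ∀ x ∈ ks, (j : Int) ≤ x) :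
    PySem.Chars.join [' '] (pvSliceSeq w ((j - 1 : Nat) : Int) ks)
      = c :: PySem.Chars.join [' '] (pvSliceSeq w ((j : Nat) : Int) ks) := by
  cases ks with
  | nil => exact absurd rfl hne
  | cons k ks =>
    simp only [pvSliceSeq]
    rw [pvShiftSlice w c rest j hj hdrop k (hge k (by simp))]
    exact pvJoin_head_cons c _ _

-- main: join of the slices at the boundary cuts = the previous-char recursion
theorem pvMain (w : List Char) : ∀ (rest : List Char) (c : Char) (j : Nat), 1 ≤ j →
    w.drop (j - 1) = c :: rest →
    PySem.Chars.join [' ']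
        (pvSliceSeq w ((j - 1 : Nat) : Int) (pvSufCuts (c :: rest) (j : Int) ++ [(w.length : Int)]))
      = c :: pvTailScan c rest := by
  intro rest
  induction rest with
  | nil =>
    intro c j hj hdrop
    have hlen : w.length - (j - 1) = 1 := by
      have := congrArg List.length hdrop; simp at this; omega
    show PySem.Chars.join [' ']
        (pvSliceSeq w ((j - 1 : Nat) : Int) ([] ++ [(w.length : Int)])) = _
    simp only [List.nil_append, pvSliceSeq]
    rw [PySem.Chars.slice_eq_listSlice, PySem.List.slice_toNat w (by omega) (by omega)]
    have h1 : ((j - 1 : Nat) : Int).toNat = j - 1 := by omega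
    have h2 : ((w.length : Int)).toNat = w.length := by omega
    rw [h1, h2, hdrop, hlen]
    simp [PySem.Chars.join_singleton, pvTailScan]
  | cons c2 rest' ih =>
    intro c j hj hdrop
    have hlen : w.length - (j - 1) = 2 + rest'.length := by
      have := congrArg List.length hdrop; simp at this; omega
    have hdrop2 : w.drop ((j + 1) - 1) = c2 :: rest' := by
      have : (w.drop (j - 1)).drop 1 = w.drop j := by
        rw [List.drop_drop]; congr 1; omega
      have h' : w.drop j = c2 :: rest' := by rw [← this, hdrop]; rfl
      simpa using h'
    have hcast : ((j : Int) + 1) = ((j + 1 : Nat) : Int) := by omega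
    have hih := ih c2 (j + 1) (by omega) hdrop2
    cases hb : (pvIsDig c == pvIsDig c2) with
    | true =>
      rw [show pvSufCuts (c :: c2 :: rest') (j : Int)
          = pvSufCuts (c2 :: rest') ((j : Int) + 1) by simp [pvSufCuts, hb]]
      rw [pvJoinShift w c (c2 :: rest') j hj hdrop _ (by simp)
        (by
          intro x hx
          rcases List.mem_append.1 hx with h | h
          · have := pvSufCuts_ge _ _ x h; omega
          · simp at h; omega)]
      rw [hcast]
      simp only [Nat.add_sub_cancel] at hih
      rw [hih]
      simp [pvTailScan, hb]
    | false =>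
      rw [show pvSufCuts (c :: c2 :: rest') (j : Int)
          = (j : Int) :: pvSufCuts (c2 :: rest') ((j : Int) + 1) by simp [pvSufCuts, hb]]
      simp only [List.cons_append, pvSliceSeq]
      have hsl : PySem.Chars.slice w (some ((j - 1 : Nat) : Int)) (some ((j : Int)))
          = [c] := by
        rw [PySem.Chars.slice_eq_listSlice, PySem.List.slice_toNat w (by omega) (by omega)]
        have h1 : ((j - 1 : Nat) : Int).toNat = j - 1 := by omega
        have h2 : ((j : Int)).toNat = j := by omega
        rw [h1, h2, hdrop]
        have : j - (j - 1) = 1 := by omega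
        rw [this]
        rfl
      rw [hsl]
      rw [pvJoin_singleton_cons c _ (pvSliceSeq_ne_nil _ _ _ (by simp))]
      rw [hcast]
      simp only [Nat.add_sub_cancel] at hih
      rw [hih]
      simp [pvTailScan, hb]

theorem pvWord_eq (w : List Char) : pvAWord w = pvBWord w := by
  by_cases hl : w.length > 2
  · cases w with
    | nil => simp at hl
    | cons c rest =>
      simp only [pvAWord, pvBWord, pvPieces, if_pos hl]
      rw [pvFoldPieces]
      rw [List.nil_append]
      have hcuts : pvCuts (c :: rest) = pvSufCuts (c :: rest) ((1 : Nat) : Int) := by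
        unfold pvCuts
        exact pvCuts_from (c :: rest) (c :: rest) 1 le_rfl (by simp)
      rw [hcuts]
      have hm := pvMain (c :: rest) rest c 1 le_rfl (by simp)
      rw [show ((0 : Int)) = ((1 - 1 : Nat) : Int) by omega, hm]
      simpa using pvAScan_last rest c
  · simp [pvAWord, pvBWord, hl]

-- ===== VERDICT (by name: the statement is the Claim_ definition above) =====
theorem split_number_word_spec : Claim_equal_split_number_word := by
  intro sentence _
  unfold Spec_split_number_word split_number_word split_number_word_alt
  rw [PySem.List.foldl_append_singleton_eq_map]
  have hm : List.map pvAWord (PySem.Chars.split₀ sentence.toList)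
      = List.map pvBWord (PySem.Chars.split₀ sentence.toList) :=
    List.map_congr_left (fun w _ => pvWord_eq w)
  rw [List.nil_append, hm]
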